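-- pv_equiv track=rewrite | github.com/shenhaidalizi/hitsz_master_course | cnm/project/cnm_project/buildup.py | get_largest_connected_component_size
-- ===== SOURCE A (Python) =====
-- def get_largest_connected_component_size(n, edges):
--     """计算最大连通子图的大小."""
--     visited = [False] * n
--
--     def dfs(node):
--         stack = [node]
--         size = 0
--         while stack:
--             current = stack.pop()
--             if not visited[current]:
--                 visited[current] = True
--                 size += 1
--                 for edge in edges:
--                     if edge[0] == current and not visited[edge[1]]:
--                         stack.append(edge[1])
--                     elif edge[1] == current and not visited[edge[0]]:
--                         stack.append(edge[0])
--         return size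
--
--     largest_size = 0
--     for node in range(n):
--         if not visited[node]:
--             component_size = dfs(node)
--             if component_size > largest_size:
--                 largest_size = component_size
--     return largest_size
-- ===== SOURCE B (Python) =====
-- def get_largest_connected_component_size(n, edges):
--     """计算最大连通子图的大小."""
--     adj = {}
--     for a, b in edges:
--         adj.setdefault(a, []).append(b)
--         adj.setdefault(b, []).append(a)
--     visited = set()
--     best = 0
--     for node in range(n):
--         if node not in visited:
--             before = len(visited)
--             stack = [node]
--             while stack:
--                 cur = stack.pop()
--                 if cur not in visited:
--                     visited.add(cur)
--                     for nb in adj.get(cur, []):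
--                         if nb not in visited:
--                             stack.append(nb)
--             best = max(best, len(visited) - before)
--     return best
-- ===== Notes on version B (the rewrite author's own statement) =====
-- stated objective: faster
-- what changed: B builds an adjacency dict once and runs each traversal over a visited SET with component sizes taken as set-growth, instead of A's rescan of the entire edge list at every visited node with a boolean array and a counter.
-- outside the precondition, e.g. on get_largest_connected_component_size(3, [(-1, 1), (1, -3)]): A returns 2, B returns 3
import Mathlib
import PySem

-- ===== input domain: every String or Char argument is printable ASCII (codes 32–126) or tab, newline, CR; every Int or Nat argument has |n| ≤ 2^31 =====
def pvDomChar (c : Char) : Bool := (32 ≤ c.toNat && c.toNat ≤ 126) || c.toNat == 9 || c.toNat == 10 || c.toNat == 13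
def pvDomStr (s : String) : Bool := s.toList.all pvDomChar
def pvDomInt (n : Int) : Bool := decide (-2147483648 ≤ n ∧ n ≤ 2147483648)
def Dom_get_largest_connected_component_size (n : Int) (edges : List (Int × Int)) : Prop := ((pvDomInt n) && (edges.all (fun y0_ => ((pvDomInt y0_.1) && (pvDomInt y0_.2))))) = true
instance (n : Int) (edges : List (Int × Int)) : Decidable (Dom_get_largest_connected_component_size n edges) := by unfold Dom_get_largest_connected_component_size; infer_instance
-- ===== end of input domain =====

-- B builds an adjacency dict once and traverses it with a visited SET (sizes = set growth),
-- replacing A's per-visit rescan of the whole edge list over a boolean array with a counter (O(V+E) vs O(V·E)).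
-- The while-loops are ported with an explicit fuel bound large enough for every admitted input.

-- ===== PORT A =====
-- the inner `dfs` worklist of A: stack held head-as-top, the edge scan is the foldl
def dfsA (edges : List (Int × Int)) : Nat → List Bool → List Int → Int → List Bool × Int
  | _, visited, [], size => (visited, size)
  | 0, visited, _, size => (visited, size)
  | fuel+1, visited, current :: rest, size =>
    if PySem.List.pyGetD visited current true then
      dfsA edges fuel visited rest size
    else
      let v' := PySem.List.pySetD visited current true
      dfsA edges fuel v'
        (edges.foldl (fun st e =>
          if e.1 == current && !(PySem.List.pyGetD v' e.2 true) then e.2 :: st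
          else if e.2 == current && !(PySem.List.pyGetD v' e.1 true) then e.1 :: st
          else st) rest)
        (size + 1)

def get_largest_connected_component_size (n : Int) (edges : List (Int × Int)) : Int :=
  let fuel := (n.toNat + 1) * (2 * edges.length + 1) + 1
  ((PySem.List.pyRange 0 n 1).foldl
    (fun (acc : List Bool × Int) node =>
      if PySem.List.pyGetD acc.1 node true then acc
      else
        let r := dfsA edges fuel acc.1 [node] 0
        (r.1, if r.2 > acc.2 then r.2 else acc.2))
    (List.replicate n.toNat false, 0)).2

-- ===== PORT B =====
-- adj.setdefault(a, []).append(b); adj.setdefault(b, []).append(a)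
def buildAdj (edges : List (Int × Int)) : PySem.Dict Int (List Int) :=
  edges.foldl (fun d e =>
    let d1 := d.insert e.1 (d.getD e.1 [] ++ [e.2])
    d1.insert e.2 (d1.getD e.2 [] ++ [e.1])) PySem.Dict.empty

-- B's inner while-loop: it only grows the visited set; the component size is read off afterwards
def exploreB (adj : PySem.Dict Int (List Int)) : Nat → PySem.Set Int → List Int → PySem.Set Int
  | _, seen, [] => seen
  | 0, seen, _ => seen
  | fuel+1, seen, cur :: rest =>
    if PySem.Set.contains seen cur then exploreB adj fuel seen rest
    else
      let seen' := PySem.Set.add seen cur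
      exploreB adj fuel seen'
        ((adj.getD cur []).foldl (fun st nb =>
          if !(PySem.Set.contains seen' nb) then nb :: st else st) rest)

-- B's `for node in range(n)` loop, as structural recursion over the node list
def scanB (adj : PySem.Dict Int (List Int)) (fuel : Nat) : List Int → PySem.Set Int → Int → Int
  | [], _, best => best
  | node :: rest, seen, best =>
    if PySem.Set.contains seen node then scanB adj fuel rest seen best
    else
      let seen' := exploreB adj fuel seen [node]
      scanB adj fuel rest seen' (max best (PySem.Set.len seen' - PySem.Set.len seen))

def get_largest_connected_component_size_alt (n : Int) (edges : List (Int × Int)) : Int :=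
  let adj := buildAdj edges
  let fuel := (n.toNat + 1) * (2 * edges.length + 1) + 1
  scanB adj fuel (PySem.List.pyRange 0 n 1) PySem.Set.empty 0

-- ===== PRECONDITION & SPEC =====
-- Pre_ admits edges whose endpoints are both canonical node ids in [0,n) (or, for n ≤ 0, anything) and
-- edges both of whose endpoints index no cell at all (outside [-n,n)), which neither program ever touches.
-- It excludes (a) mixed edges, on which A raises IndexError, and (b) edges with a negative in-range
-- endpoint, where Python's negative indexing makes two names alias one visited cell, so A's value depends
-- on its traversal order (a defensible-corner artefact; B treats names as nodes and counts differently —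
-- see the cite in claim.json).
def Pre_get_largest_connected_component_size (n : Int) (edges : List (Int × Int)) : Prop :=
  n ≤ 0 ∨ ∀ p ∈ edges,
    (0 ≤ p.1 ∧ p.1 < n ∧ 0 ≤ p.2 ∧ p.2 < n) ∨
    (¬(-n ≤ p.1 ∧ p.1 < n) ∧ ¬(-n ≤ p.2 ∧ p.2 < n))
instance (n : Int) (edges : List (Int × Int)) : Decidable (Pre_get_largest_connected_component_size n edges) := by unfold Pre_get_largest_connected_component_size; infer_instance

def pvWitness_get_largest_connected_component_size : Int × (List (Int × Int)) := (4, [(0, 1), (2, 2), (3, 1)])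

def Spec_get_largest_connected_component_size (n : Int) (edges : List (Int × Int)) (out : Int) : Prop := out = get_largest_connected_component_size_alt n edges
instance (n : Int) (edges : List (Int × Int)) (out : Int) : Decidable (Spec_get_largest_connected_component_size n edges out) := by unfold Spec_get_largest_connected_component_size; infer_instance

-- ===== CLAIM (what is proved, stated in full; the proofs are below) =====
def Claim_equal_get_largest_connected_component_size : Prop := ∀ (n : Int) (edges : List (Int × Int)), Dom_get_largest_connected_component_size n edges → Pre_get_largest_connected_component_size n edges → Spec_get_largest_connected_component_size n edges (get_largest_connected_component_size n edges)

-- ===== LEMMAS AND PROOFS =====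

-- the visited boolean list of A and the visited set of B agree on every canonical node id
def RelVS (n : Int) (v : List Bool) (s : List Int) : Prop :=
  ∀ i : Int, 0 ≤ i → i < n → (PySem.List.pyGetD v i true = true ↔ i ∈ s)

-- all edges touching a canonical id are canonical (the P-part of Pre_)
def EdgesOK (n : Int) (edges : List (Int × Int)) : Prop :=
  ∀ p ∈ edges, (0 ≤ p.1 ∧ p.1 < n ∧ 0 ≤ p.2 ∧ p.2 < n) ∨
    (¬(-n ≤ p.1 ∧ p.1 < n) ∧ ¬(-n ≤ p.2 ∧ p.2 < n))

-- reading back a freshly set cell / an untouched cell, at canonical indices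
theorem pyGetD_pySetD_valid (v : List Bool) (c i : Int)
    (hc0 : 0 ≤ c) (_hc1 : c < (v.length : Int)) (hi0 : 0 ≤ i) (hi1 : i < (v.length : Int)) :
    PySem.List.pyGetD (PySem.List.pySetD v c true) i true
      = if i = c then true else PySem.List.pyGetD v i true := by
  rw [PySem.List.pySetD_of_nonneg v true hc0,
      PySem.List.pyGetD_eq_getElem _ true hi0 (by simpa using hi1),
      PySem.List.pyGetD_eq_getElem v true hi0 hi1]
  rw [List.getElem_set]
  by_cases h : i = c
  · simp [h]
  · have : ¬ c.toNat = i.toNat := by omega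
    simp [h, this]

-- the per-edge contribution of one edge to the adjacency list of c
def contribE (e : Int × Int) (c : Int) : List Int :=
  (if e.1 == c then [e.2] else []) ++ (if e.2 == c then [e.1] else [])

theorem getD_empty (c : Int) : (PySem.Dict.empty : PySem.Dict Int (List Int)).getD c [] = [] := by
  simp [PySem.Dict.getD, PySem.Dict.get?, PySem.Dict.empty]

theorem getD_insert (d : PySem.Dict Int (List Int)) (k c : Int) (v : List Int) :
    (d.insert k v).getD c [] = if c = k then v else d.getD c [] := by
  by_cases h : c = k
  · simp [h, PySem.Dict.getD, PySem.Dict.get?_insert_self]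
  · simp [h, PySem.Dict.getD, PySem.Dict.get?_insert_of_ne _ _ h]

-- adjacency list of c grows by contribE when one edge is appended
theorem adj_snoc (es : List (Int × Int)) (e : Int × Int) (c : Int) :
    (buildAdj (es ++ [e])).getD c [] = (buildAdj es).getD c [] ++ contribE e c := by
  obtain ⟨a, b⟩ := e
  simp only [buildAdj, List.foldl_append, List.foldl_cons, List.foldl_nil]
  rw [show (List.foldl _ PySem.Dict.empty es) = buildAdj es from rfl]
  simp only [contribE, getD_insert]
  by_cases hcb : c = b <;> by_cases hca : c = a
  · simp [hcb, show a = b by omega]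
  · simp [hcb, show ¬b = a by omega, show ¬a = b by omega]
  · simp [hca, show ¬b = a by omega, show ¬a = b by omega]
  · simp [hcb, hca]
    constructor <;> omega

-- a neighbour recorded in the adjacency dict comes from an actual edge
theorem mem_adj (es : List (Int × Int)) (c nb : Int)
    (h : nb ∈ (buildAdj es).getD c []) : (c, nb) ∈ es ∨ (nb, c) ∈ es := by
  induction es using List.reverseRecOn with
  | nil => rw [show buildAdj [] = PySem.Dict.empty from rfl, getD_empty] at h; cases h
  | append_singleton es e ih =>
    rw [adj_snoc] at h
    rcases List.mem_append.1 h with h1 | h2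
    · rcases ih h1 with h | h
      · exact Or.inl (List.mem_append.2 (Or.inl h))
      · exact Or.inr (List.mem_append.2 (Or.inl h))
    · obtain ⟨a, b⟩ := e
      simp only [contribE] at h2
      rcases List.mem_append.1 h2 with h3 | h3 <;> by_cases ha : a = c <;> by_cases hb : b = c <;>
        simp_all

-- under EdgesOK, every neighbour of a canonical node is canonical
theorem adj_valid (n : Int) (es : List (Int × Int)) (hE : EdgesOK n es) (c nb : Int)
    (hc : 0 ≤ c ∧ c < n) (h : nb ∈ (buildAdj es).getD c []) : 0 ≤ nb ∧ nb < n := by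
  rcases mem_adj es c nb h with h | h <;> rcases hE _ h with h' | h' <;> simp at h' <;> omega

-- key lemma: at a just-visited node c, A's edge-scan pushes exactly B's adjacency-scan pushes
theorem pushes_eq (edges : List (Int × Int)) (v : List Bool) (c : Int)
    (h : PySem.List.pyGetD v c true = true) (st : List Int) :
    edges.foldl (fun st e =>
        if e.1 == c && !(PySem.List.pyGetD v e.2 true) then e.2 :: st
        else if e.2 == c && !(PySem.List.pyGetD v e.1 true) then e.1 :: st
        else st) st
      = ((buildAdj edges).getD c []).foldl (fun st nb =>
          if !(PySem.List.pyGetD v nb true) then nb :: st else st) st := by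
  induction edges using List.reverseRecOn generalizing st with
  | nil => simp only [buildAdj, List.foldl_nil, getD_empty, List.foldl]
  | append_singleton es e ih =>
    obtain ⟨a, b⟩ := e
    rw [adj_snoc, List.foldl_append, List.foldl_append, List.foldl_cons, List.foldl_nil, ih]
    generalize ((buildAdj es).getD c []).foldl _ st = st0
    simp only [contribE]
    by_cases hac : a = c <;> by_cases hbc : b = c <;>
      simp [hac, hbc, h]

-- membership in a filtered-push foldl
theorem mem_foldl_push {p : Int → Bool} (l : List Int) (st0 : List Int) (x : Int)
    (h : x ∈ l.foldl (fun st nb => if p nb then nb :: st else st) st0) : x ∈ st0 ∨ x ∈ l := by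
  induction l generalizing st0 with
  | nil => exact Or.inl h
  | cons a l ih =>
    rcases ih _ h with h' | h'
    · by_cases hp : p a <;> simp [hp] at h'
      · rcases h' with h' | h'
        · subst h'; simp
        · exact Or.inl h'
      · exact Or.inl h'
    · simp [h']

-- the two inner loops simulate each other step for step
theorem dfs_sim (n : Int) (edges : List (Int × Int)) (hE : EdgesOK n edges) :
    ∀ (fuel : Nat) (v : List Bool) (s : PySem.Set Int) (st : List Int) (sz : Int),
      RelVS n v s → (∀ x ∈ st, 0 ≤ x ∧ x < n) → v.length = n.toNat →
      RelVS n (dfsA edges fuel v st sz).1 (exploreB (buildAdj edges) fuel s st)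
      ∧ (dfsA edges fuel v st sz).1.length = n.toNat
      ∧ (dfsA edges fuel v st sz).2 + (PySem.Set.len s : Int)
          = sz + PySem.Set.len (exploreB (buildAdj edges) fuel s st) := by
  intro fuel
  induction fuel with
  | zero =>
    intro v s st sz hR _ hL
    cases st <;> exact ⟨hR, hL, by simp [dfsA, exploreB]⟩
  | succ f ih =>
    intro v s st sz hR hst hL
    cases st with
    | nil => exact ⟨hR, hL, by simp [dfsA, exploreB]⟩
    | cons c rest =>
      have hc : 0 ≤ c ∧ c < n := hst c (by simp)
      have hrest : ∀ x ∈ rest, 0 ≤ x ∧ x < n := fun x hx => hst x (by simp [hx])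
      by_cases hcs : c ∈ s
      · have hv : PySem.List.pyGetD v c true = true := (hR c hc.1 hc.2).2 hcs
        have hbc : PySem.Set.contains s c = true := (PySem.Set.contains_iff _ _).2 hcs
        simp only [dfsA, exploreB, hv, hbc, if_true]
        exact ih v s rest sz hR hrest hL
      · have hv : PySem.List.pyGetD v c true = false := by
          cases hb : PySem.List.pyGetD v c true
          · rfl
          · exact absurd ((hR c hc.1 hc.2).1 hb) hcs
        have hbc : PySem.Set.contains s c = false := by
          cases hb : PySem.Set.contains s c
          · rfl
          · exact absurd ((PySem.Set.contains_iff _ _).1 hb) hcs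
        simp only [dfsA, exploreB, hv, hbc, Bool.false_eq_true, if_false]
        set v' := PySem.List.pySetD v c true with hv'def
        set s' := PySem.Set.add s c with hs'def
        have hL' : v'.length = n.toNat := by
          rw [hv'def, PySem.List.pySetD_of_nonneg v true hc.1]; simpa using hL
        have hclen : c < (v.length : Int) := by rw [hL]; omega
        have hR' : RelVS n v' s' := by
          intro i hi0 hi1
          rw [hv'def, pyGetD_pySetD_valid v c i hc.1 hclen hi0 (by rw [hL]; omega)]
          rw [hs'def, PySem.Set.add_eq_ite]
          by_cases hic : i = c
          · simp [hic, hcs]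
          · simp only [hic, if_false]
            rw [hR i hi0 hi1]
            simp [hcs, hic]
        have hlen' : (PySem.Set.len s' : Int) = PySem.Set.len s + 1 := by
          rw [hs'def, PySem.Set.add_of_not_mem hcs]
          simp [PySem.Set.len]
        have hmemc : PySem.List.pyGetD v' c true = true := by
          rw [hv'def, pyGetD_pySetD_valid v c c hc.1 hclen hc.1 hclen]; simp
        -- A's new stack equals B's new stack
        have hstacks :
            edges.foldl (fun st e =>
              if e.1 == c && !(PySem.List.pyGetD v' e.2 true) then e.2 :: st
              else if e.2 == c && !(PySem.List.pyGetD v' e.1 true) then e.1 :: st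
              else st) rest
            = ((buildAdj edges).getD c []).foldl (fun st nb =>
                if !(PySem.Set.contains s' nb) then nb :: st else st) rest := by
          rw [pushes_eq edges v' c hmemc rest]
          apply PySem.List.foldl_congr_mem
          intro acc x hx
          have hxv : 0 ≤ x ∧ x < n := adj_valid n edges hE c x hc hx
          have h1 := hR' x hxv.1 hxv.2
          have hbool : PySem.List.pyGetD v' x true = PySem.Set.contains s' x := by
            by_cases hm : x ∈ s'
            · rw [h1.2 hm, (PySem.Set.contains_iff _ _).2 hm]
            · have ha : PySem.List.pyGetD v' x true = false := by
                cases hb : PySem.List.pyGetD v' x true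
                · rfl
                · exact absurd (h1.1 hb) hm
              have hb : PySem.Set.contains s' x = false := by
                cases hb2 : PySem.Set.contains s' x
                · rfl
                · exact absurd ((PySem.Set.contains_iff _ _).1 hb2) hm
              rw [ha, hb]
          rw [hbool]
        rw [hstacks]
        have hst' : ∀ x ∈ ((buildAdj edges).getD c []).foldl (fun st nb =>
            if !(PySem.Set.contains s' nb) then nb :: st else st) rest, 0 ≤ x ∧ x < n := by
          intro x hx
          rcases mem_foldl_push _ _ _ hx with h | h
          · exact hrest x h
          · exact adj_valid n edges hE c x hc h
        obtain ⟨r1, r2, r3⟩ := ih v' s' _ (sz + 1) hR' hst' hL'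
        exact ⟨r1, r2, by omega⟩

-- the outer loops simulate each other over any list of canonical nodes
theorem scan_sim (n : Int) (edges : List (Int × Int)) (hE : EdgesOK n edges) (fuel : Nat) :
    ∀ (nodes : List Int) (v : List Bool) (s : PySem.Set Int) (best : Int),
      RelVS n v s → v.length = n.toNat → (∀ x ∈ nodes, 0 ≤ x ∧ x < n) →
      (nodes.foldl
        (fun (acc : List Bool × Int) node =>
          if PySem.List.pyGetD acc.1 node true then acc
          else
            let r := dfsA edges fuel acc.1 [node] 0
            (r.1, if r.2 > acc.2 then r.2 else acc.2))
        (v, best)).2 = scanB (buildAdj edges) fuel nodes s best := by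
  intro nodes
  induction nodes with
  | nil => intro v s best _ _ _; rfl
  | cons node rest ih =>
    intro v s best hR hL hnodes
    have hc : 0 ≤ node ∧ node < n := hnodes node (by simp)
    have hrest : ∀ x ∈ rest, 0 ≤ x ∧ x < n := fun x hx => hnodes x (by simp [hx])
    by_cases hns : node ∈ s
    · have hv : PySem.List.pyGetD v node true = true := (hR node hc.1 hc.2).2 hns
      have hbc : PySem.Set.contains s node = true := (PySem.Set.contains_iff _ _).2 hns
      simp only [List.foldl_cons, scanB, hv, hbc, if_true]
      exact ih v s best hR hL hrest
    · have hv : PySem.List.pyGetD v node true = false := by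
        cases hb : PySem.List.pyGetD v node true
        · rfl
        · exact absurd ((hR node hc.1 hc.2).1 hb) hns
      have hbc : PySem.Set.contains s node = false := by
        cases hb : PySem.Set.contains s node
        · rfl
        · exact absurd ((PySem.Set.contains_iff _ _).1 hb) hns
      simp only [List.foldl_cons, scanB, hv, hbc, Bool.false_eq_true, if_false]
      obtain ⟨r1, r2, r3⟩ := dfs_sim n edges hE fuel v s [node] 0 hR
        (by intro x hx; simp at hx; subst hx; exact hc) hL
      have hsz : (dfsA edges fuel v [node] 0).2
          = PySem.Set.len (exploreB (buildAdj edges) fuel s [node]) - PySem.Set.len s := by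
        omega
      have hbest : (if (dfsA edges fuel v [node] 0).2 > best then (dfsA edges fuel v [node] 0).2 else best)
          = max best (PySem.Set.len (exploreB (buildAdj edges) fuel s [node]) - PySem.Set.len s) := by
        rw [hsz, max_def]; split_ifs <;> omega
      rw [hbest]
      exact ih _ _ _ r1 r2 hrest

-- initially: all-false boolean list ↔ empty set
theorem rel_init (n : Int) : RelVS n (List.replicate n.toNat false) PySem.Set.empty := by
  intro i hi0 hi1
  rw [PySem.List.pyGetD_eq_getElem _ true hi0 (by simp; omega)]
  simp [PySem.Set.empty]

-- ===== VERDICT (by name: the statement is the Claim_ definition above) =====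
theorem get_largest_connected_component_size_spec : Claim_equal_get_largest_connected_component_size := by
  intro n edges _ hPre
  unfold Spec_get_largest_connected_component_size
  unfold get_largest_connected_component_size get_largest_connected_component_size_alt
  rcases hPre with hn | hE
  · have hempty : PySem.List.pyRange 0 n 1 = [] := by
      apply List.eq_nil_of_length_eq_zero
      rw [PySem.List.length_pyRange_one]; omega
    simp [hempty, scanB]
  · have h := scan_sim n edges hE ((n.toNat + 1) * (2 * edges.length + 1) + 1)
      (PySem.List.pyRange 0 n 1)
      (List.replicate n.toNat false) PySem.Set.empty 0 (rel_init n) (by simp)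
      (by intro x hx; rw [PySem.List.mem_pyRange_one] at hx; omega)
    exact h
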